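-- pv_equiv track=rewrite | github.com/Mozzie11/DataMining_Assignments | Assignment1/FpGrowth.py | subsetsbinary
-- ===== SOURCE A (Python) =====
-- def subsetsbinary(datasets):
--     N=len(datasets)
--     subsets=[]
--     for i in range(2**N):
--         subset = []
--         for j in range(N):
--             if(i>>j)%2==1:
--                 subset.append(datasets[j])
--         subsets.append(subset)
--     del subsets[0]
--     for i in list(subsets):
--         if datasets[0] not in i:
--             subsets.remove(i)
--     return subsets
-- ===== SOURCE B (Python) =====
-- def subsetsbinary(datasets):
--     # Recursive doubling: subsets in bitmask order, then keep those containing datasets[0].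
--     def all_subsets(items):
--         if not items:
--             return [[]]
--         rest = all_subsets(items[1:])
--         out = []
--         for s in rest:
--             out.append(s)
--             out.append([items[0]] + s)
--         return out
--     return [s for s in all_subsets(datasets)[1:] if datasets[0] in s]
-- ===== Notes on version B (the rewrite author's own statement) =====
-- stated objective: faster
-- what changed: Replaces the 2^N-iteration bitmask enumeration plus the quadratic copy-and-list.remove deletion pass with a recursive doubling construction of the subset list and a single filter keeping subsets that contain the first element; intended as faster (asymptotic), measured: a timing run saw A time out at n=16 where B still returned, so no clean ratio was read.
import Mathlib
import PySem

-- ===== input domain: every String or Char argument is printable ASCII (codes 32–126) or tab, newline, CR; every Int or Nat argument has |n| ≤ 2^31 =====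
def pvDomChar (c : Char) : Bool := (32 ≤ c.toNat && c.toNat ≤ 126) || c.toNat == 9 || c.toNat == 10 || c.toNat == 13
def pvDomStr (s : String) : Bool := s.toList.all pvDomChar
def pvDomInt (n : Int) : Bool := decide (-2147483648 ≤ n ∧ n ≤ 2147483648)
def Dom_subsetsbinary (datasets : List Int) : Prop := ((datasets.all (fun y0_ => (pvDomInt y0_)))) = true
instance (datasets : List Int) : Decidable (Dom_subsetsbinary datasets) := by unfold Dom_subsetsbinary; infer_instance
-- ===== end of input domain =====

-- B replaces A's 2^N-bitmask enumeration plus quadratic copy-and-remove pass by a recursive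
-- doubling construction and a single filter (objective: faster; intended asymptotic — the timing
-- run saw A time out where B returned, but could not read a clean ratio).

-- ===== PORT A =====
def subsetsbinary (datasets : List Int) : List (List Int) :=
  -- N = len(datasets)
  let N : Int := (datasets.length : Int)
  -- for i in range(2**N): build subset from the bits of i, append it
  let gen : List (List Int) :=
    (PySem.List.pyRange 0 ((2:Int) ^ datasets.length) 1).foldl
      (fun subsets i =>
        subsets ++ [(PySem.List.pyRange 0 N 1).foldl
          (fun subset j =>
            -- (i >> j) % 2 == 1 ; j comes from range(N) so j ≥ 0 and j.toNat is exact
            if PySem.Int.mod (i >>> j.toNat) 2 == 1 then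
              -- datasets[j]: 0 ≤ j < len(datasets), always in range, never raises
              subset ++ [PySem.List.pyGetD datasets j 0]
            else subset) []]) []
  -- del subsets[0]: gen has 2^N ≥ 1 elements, so this is exactly dropping the head
  let subsets := gen.drop 1
  -- for i in list(subsets): if datasets[0] not in i: subsets.remove(i)
  -- datasets[0] is only evaluated when subsets ≠ [], i.e. datasets ≠ [], so it never raises;
  -- remove? never returns none since i is always present in acc.
  subsets.foldl
    (fun acc i =>
      if PySem.List.pyGetD datasets 0 0 ∈ i then acc
      else (PySem.List.remove? acc i).getD acc)
    subsets

-- ===== PORT B =====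
-- all_subsets(items): recursive doubling, subsets in bitmask order
def pvAllSubsets : List Int → List (List Int)
  | [] => [[]]
  | x :: rest => (pvAllSubsets rest).foldl (fun out s => out ++ [s, x :: s]) []

def subsetsbinary_alt (datasets : List Int) : List (List Int) :=
  -- [s for s in all_subsets(datasets)[1:] if datasets[0] in s]
  -- datasets[0] is only evaluated when the list is nonempty, i.e. datasets ≠ [], so it never raises
  (PySem.List.slice (pvAllSubsets datasets) (some 1) none).filter
    (fun s => decide (PySem.List.pyGetD datasets 0 0 ∈ s))

-- ===== PRECONDITION & SPEC =====
def Spec_subsetsbinary (datasets : List Int) (out : List (List Int)) : Prop := out = subsetsbinary_alt datasets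
instance (datasets : List Int) (out : List (List Int)) : Decidable (Spec_subsetsbinary datasets out) := by unfold Spec_subsetsbinary; infer_instance

-- ===== CLAIM (what is proved, stated in full; the proofs are below) =====
def Claim_equal_subsetsbinary : Prop := ∀ (datasets : List Int), Dom_subsetsbinary datasets → Spec_subsetsbinary datasets (subsetsbinary datasets)

-- ===== LEMMAS AND PROOFS =====

-- the subset selected by the bits of m (bit j of m picks element j)
def bitsSel : List Int → Nat → List Int
  | [], _ => []
  | x :: r, m => (if m % 2 = 1 then [x] else []) ++ bitsSel r (m / 2)

lemma bit_test (i : Int) (m k : Nat) (hi : i = (m:Int)) :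
    (PySem.Int.mod (i >>> k) 2 == 1) = decide ((m / 2^k) % 2 = 1) := by
  subst hi
  rw [← Int.natCast_shiftRight]
  rw [show PySem.Int.mod ((m >>> k : Nat) : Int) 2 = (((m >>> k) % 2 : Nat) : Int) from
    by exact_mod_cast PySem.Int.mod_natCast (m >>> k) 2]
  rw [Nat.shiftRight_eq_div_pow]
  rcases Nat.mod_two_eq_zero_or_one (m / 2^k) with h | h <;> simp [h]

lemma sel_core (ds : List Int) (m : Nat) :
    ((List.range ds.length).filter (fun k => decide ((m / 2^k) % 2 = 1))).map
        (fun k => ds.getD k 0)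
      = bitsSel ds m := by
  induction ds generalizing m with
  | nil => simp [bitsSel]
  | cons x r ih =>
    rw [List.length_cons, List.range_succ_eq_map, List.filter_cons]
    have htail : ((List.filter (fun k => decide ((m / 2^k) % 2 = 1))
        (List.map Nat.succ (List.range r.length)))).map (fun k => (x::r).getD k 0)
        = bitsSel r (m/2) := by
      rw [List.filter_map, List.map_map, ← ih (m/2)]
      congr 1
      apply List.filter_congr
      intro k _
      simp only [Function.comp_apply, Nat.succ_eq_add_one]
      rw [show m / 2 / 2^k = m / 2^(k+1) from by rw [Nat.div_div_eq_div_mul, ← Nat.pow_succ']]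
    by_cases h0 : m % 2 = 1
    · simp only [pow_zero, Nat.div_one, h0, decide_true, if_pos]
      rw [List.map_cons, List.getD_cons_zero]
      rw [htail]
      simp [bitsSel, h0]
    · simp only [pow_zero, Nat.div_one, h0, decide_false, if_neg, Bool.false_eq_true,
        not_false_eq_true]
      rw [htail]
      simp [bitsSel, h0]

lemma genA_eq (ds : List Int) :
    (PySem.List.pyRange 0 ((2:Int) ^ ds.length) 1).foldl
      (fun subsets i => subsets ++ [(PySem.List.pyRange 0 (ds.length : Int) 1).foldl
        (fun subset j =>
          if PySem.Int.mod (i >>> j.toNat) 2 == 1 then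
            subset ++ [PySem.List.pyGetD ds j 0]
          else subset) []]) []
    = (List.range (2^ds.length)).map (bitsSel ds) := by
  rw [PySem.List.foldl_append_singleton_eq_map, List.nil_append]
  rw [PySem.List.pyRange_one 0 ((2:Int) ^ ds.length)]
  rw [show (((2:Int) ^ ds.length) - 0).toNat = 2^ds.length from by
    rw [sub_zero, show ((2:Int) ^ ds.length) = ((2^ds.length : Nat) : Int) from by
      push_cast; rfl, Int.toNat_natCast]]
  rw [List.map_map]
  apply List.map_congr_left
  intro k _
  simp only [Function.comp_apply, zero_add]
  rw [PySem.List.pyRange_one 0 (ds.length : Int)]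
  simp only [sub_zero, Int.toNat_natCast, zero_add]
  rw [List.foldl_map]
  rw [PySem.List.foldl_append_if]
  rw [List.nil_append, ← sel_core ds k]
  congr 1
  · funext y
    simp [pysem]
  · apply List.filter_congr
    intro k' _
    rw [Int.toNat_natCast]
    exact bit_test ((k:Nat) : Int) k k' rfl

lemma range_double {α : Type} (f : Nat → α) (m : Nat) :
    (List.range (2*m)).map f = (List.range m).flatMap (fun k => [f (2*k), f (2*k+1)]) := by
  induction m with
  | zero => simp
  | succ m ih =>
    rw [show 2*(m+1) = (2*m + 1) + 1 from by ring]
    rw [List.range_succ, List.range_succ, List.range_succ]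
    simp [ih]

lemma bitsSel_even (x : Int) (r : List Int) (k : Nat) : bitsSel (x :: r) (2*k) = bitsSel r k := by
  rw [bitsSel, if_neg (by omega), Nat.mul_div_cancel_left k (by norm_num), List.nil_append]

lemma bitsSel_odd (x : Int) (r : List Int) (k : Nat) : bitsSel (x :: r) (2*k+1) = x :: bitsSel r k := by
  rw [bitsSel, if_pos (by omega), show (2*k+1)/2 = k from by omega, List.singleton_append]

lemma allSubsets_eq (ds : List Int) :
    pvAllSubsets ds = (List.range (2^ds.length)).map (bitsSel ds) := by
  induction ds with
  | nil => decide
  | cons x r ih =>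
    rw [show pvAllSubsets (x :: r) = (pvAllSubsets r).flatMap (fun s => [s, x :: s]) from by
      show (pvAllSubsets r).foldl (fun out s => out ++ [s, x :: s]) [] = _
      simpa using PySem.List.foldl_append_eq_flatMap (fun s => [s, x :: s]) (pvAllSubsets r) []]
    rw [ih, List.length_cons, show (2:Nat)^(r.length+1) = 2*2^r.length from Nat.pow_succ',
      range_double]
    rw [List.flatMap_map]
    apply List.flatMap_congr
    intro k _
    simp [bitsSel_even, bitsSel_odd]

lemma remove?_append_of_not_mem (pref l : List (List Int)) (x : List Int) (hx : x ∉ pref) :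
    PySem.List.remove? (pref ++ x :: l) x = some (pref ++ l) := by
  induction pref with
  | nil => simp
  | cons a p ih =>
    have ha : a ≠ x := fun h => hx (h ▸ List.mem_cons_self)
    rw [List.cons_append, PySem.List.remove?_cons_of_ne (p ++ x :: l) ha,
      ih (fun h => hx (List.mem_cons_of_mem a h))]
    rfl

lemma removal_loop (d : Int) (l : List (List Int)) :
    ∀ pref : List (List Int), (∀ z ∈ pref, d ∈ z) →
      l.foldl (fun acc i => if d ∈ i then acc else (PySem.List.remove? acc i).getD acc) (pref ++ l)
        = pref ++ l.filter (fun s => decide (d ∈ s)) := by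
  induction l with
  | nil => intro pref _; simp
  | cons x l ih =>
    intro pref hpref
    rw [List.foldl_cons]
    by_cases hx : d ∈ x
    · rw [if_pos hx]
      rw [show pref ++ x :: l = (pref ++ [x]) ++ l from by simp]
      rw [ih (pref ++ [x]) (by
        intro z hz
        rcases List.mem_append.mp hz with h | h
        · exact hpref z h
        · rw [List.mem_singleton.mp h]; exact hx)]
      simp [hx]
    · rw [if_neg hx]
      have hxp : x ∉ pref := fun h => hx (hpref x h)
      rw [remove?_append_of_not_mem pref l x hxp, Option.getD_some, ih pref hpref]
      simp [hx]

-- ===== VERDICT (by name: the statement is the Claim_ definition above) =====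
theorem subsetsbinary_spec : Claim_equal_subsetsbinary := by
  intro ds _
  unfold Spec_subsetsbinary
  simp only [subsetsbinary, subsetsbinary_alt]
  rw [genA_eq]
  rw [show PySem.List.slice (pvAllSubsets ds) (some 1) none = (pvAllSubsets ds).drop 1 from by
    simp [pysem]]
  rw [allSubsets_eq]
  have h := removal_loop (PySem.List.pyGetD ds 0 0)
    (((List.range (2^ds.length)).map (bitsSel ds)).drop 1) [] (by intro z hz; cases hz)
  simpa using h
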